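-- pv_equiv track=rewrite | github.com/notquitehere/adventofcode | 2020/day6.py | part1
-- ===== SOURCE A (Python) =====
-- def part1(data):
--     groups = [set()]
--
--     for l in data:
--         if l == "":
--             groups.append(set())
--         else:
--             groups[len(groups)-1].update(*list(l))
--
--     return sum([len(i) for i in groups])
-- ===== SOURCE B (Python) =====
-- def part1(data):
--     total = 0
--     while "" in data:
--         i = data.index("")
--         total += len(set("".join(data[:i])))
--         data = data[i + 1:]
--     return total + len(set("".join(data)))
-- ===== Notes on version B (the rewrite author's own statement) =====
-- stated objective: faster
-- what changed: Instead of one pass that appends to and incrementally updates a list of per-group character sets (via update(*list(l)) on the last element) and sums their sizes at the end, B repeatedly locates the next blank-line separator with index, slices out the whole group, counts the distinct characters of its joined text with one set("".join(...)) call, and accumulates a running integer total.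
import Mathlib
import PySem

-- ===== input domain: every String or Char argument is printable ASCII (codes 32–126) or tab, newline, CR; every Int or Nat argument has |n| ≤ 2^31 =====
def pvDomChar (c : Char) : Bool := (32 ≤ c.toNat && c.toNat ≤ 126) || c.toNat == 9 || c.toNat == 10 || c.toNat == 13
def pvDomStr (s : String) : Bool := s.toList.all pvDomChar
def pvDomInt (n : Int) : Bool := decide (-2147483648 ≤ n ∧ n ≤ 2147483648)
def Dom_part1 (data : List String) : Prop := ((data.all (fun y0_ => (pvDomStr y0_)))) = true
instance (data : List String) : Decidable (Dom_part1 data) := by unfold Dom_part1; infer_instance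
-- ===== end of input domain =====

-- B replaces A's single pass that incrementally updates a list of per-group character
-- sets (summed at the end) by a loop that repeatedly finds the next blank-line separator
-- with index, slices out the whole group, counts the distinct characters of its joined
-- text with one bulk set("".join(...)) call, and accumulates a running integer total
-- (objective: faster; a timing run measured B ≥ 1.5× faster at the largest size).

-- ===== PORT A =====
-- the loop body of A's 'for l in data'; groups[len(groups)-1] is always in range
-- (groups starts and stays nonempty), so the total pyGetD/pySetD forms are exact here;
-- .update(*list(l)) unpacks the characters of l, i.e. updates with the chars of l
def stepA (groups : List (PySem.Set Char)) (l : String) : List (PySem.Set Char) :=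
  if l == "" then groups ++ [PySem.Set.empty]
  else
    PySem.List.pySetD groups ((groups.length : Int) - 1)
      (PySem.Set.update
        (PySem.List.pyGetD groups ((groups.length : Int) - 1) PySem.Set.empty) l.toList)

def part1 (data : List String) : Int :=
  ((data.foldl stepA [PySem.Set.empty]).map (fun i => (PySem.Set.len i : Int))).sum

-- ===== PORT B =====
-- len(set("".join(g)))
def altCount (g : List String) : Int :=
  (PySem.Set.len (PySem.Set.ofList (PySem.Str.join "" g).toList) : Int)

-- B's while loop as tail recursion on (total, data); the guard '"" in data' and the
-- subsequent data.index("") are rendered by one match on PySem.List.index? (some i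
-- exactly when "" is in data, with i its first index) — exact
def part1AltLoop (total : Int) (data : List String) : Int :=
  match h : PySem.List.index? data "" with
  | some i =>
      part1AltLoop (total + altCount (PySem.List.slice data none (some (i : Int))))
        (PySem.List.slice data (some ((i : Int) + 1)) none)
  | none => total + altCount data
termination_by data.length
decreasing_by
  obtain ⟨hk, -, -⟩ := PySem.List.getElem_of_index?_eq_some h
  have : ((i : Int) + 1) = ((i + 1 : Nat) : Int) := by push_cast; ring
  rw [this, PySem.List.slice_from_natCast]
  simp only [List.length_drop]
  omega

def part1_alt (data : List String) : Int := part1AltLoop 0 data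

-- ===== PRECONDITION & SPEC =====
def Spec_part1 (data : List String) (out : Int) : Prop := out = part1_alt data
instance (data : List String) (out : Int) : Decidable (Spec_part1 data out) := by unfold Spec_part1; infer_instance

-- ===== CLAIM (what is proved, stated in full; the proofs are below) =====
def Claim_equal_part1 : Prop := ∀ (data : List String), Dom_part1 data → Spec_part1 data (part1 data)

-- ===== LEMMAS AND PROOFS =====

-- A's run, abstracted: the set of the currently open group is the accumulator
def runA (s : PySem.Set Char) : List String → Int
  | [] => (PySem.Set.len s : Int)
  | l :: rest =>
      if l == "" then (PySem.Set.len s : Int) + runA PySem.Set.empty rest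
      else runA (PySem.Set.update s l.toList) rest

lemma foldA_eq_runA (data : List String) :
    ∀ (init : List (PySem.Set Char)) (s : PySem.Set Char),
    (((data.foldl stepA (init ++ [s])).map (fun i => (PySem.Set.len i : Int))).sum)
      = ((init.map (fun i => (PySem.Set.len i : Int))).sum) + runA s data := by
  induction data with
  | nil => intro init s; simp [runA]
  | cons l rest ih =>
    intro init s
    by_cases hl : l = ""
    · subst hl
      have hstep : stepA (init ++ [s]) "" = (init ++ [s]) ++ [PySem.Set.empty] := by
        simp [stepA]
      rw [List.foldl_cons, hstep, ih (init ++ [s]) PySem.Set.empty]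
      simp [runA]; ring
    · have hidx : (((init ++ [s]).length : Int) - 1) = ((init.length : Nat) : Int) := by simp
      have hstep : stepA (init ++ [s]) l = init ++ [PySem.Set.update s l.toList] := by
        rw [stepA, if_neg (fun hc => hl (by simpa using hc)), hidx,
          PySem.List.pyGetD_natCast, PySem.List.pySetD_natCast]
        simp
      rw [List.foldl_cons, hstep, ih init (PySem.Set.update s l.toList)]
      simp [runA, hl]

-- B's run, abstracted to take/drop around the first blank line, with an extra seed set s
def altWith (s : PySem.Set Char) (data : List String) : Int :=
  match PySem.List.index? data "" with
  | some i =>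
      (PySem.Set.len (PySem.Set.update s ((data.take i).map String.toList).flatten) : Int)
        + part1_alt (data.drop (i + 1))
  | none => (PySem.Set.len (PySem.Set.update s (data.map String.toList).flatten) : Int)

-- general fact: "".join concatenates (join with empty separator is flatten)
lemma intercalate_nil_eq_flatten : ∀ (pss : List (List Char)),
    ([] : List Char).intercalate pss = pss.flatten := by
  intro pss
  induction pss with
  | nil => rfl
  | cons p ps ih =>
    cases ps with
    | nil => simp [List.intercalate]
    | cons q qs =>
      simp only [List.intercalate] at ih ⊢
      simp [List.intersperse] at ih ⊢
      simp [ih]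

lemma altCount_eq (g : List String) :
    altCount g = PySem.Set.len (PySem.Set.update PySem.Set.empty (g.map String.toList).flatten) := by
  have h : (PySem.Str.join "" g).toList = (g.map String.toList).flatten := by
    simp [PySem.Str.toList_join, PySem.Chars.join, intercalate_nil_eq_flatten]
  rw [altCount, h, PySem.Set.update_empty]

lemma slice_take (data : List String) (i : Nat) :
    PySem.List.slice data none (some (i : Int)) = data.take i := PySem.List.slice_to_natCast data i

lemma slice_drop (data : List String) (i : Nat) :
    PySem.List.slice data (some ((i : Int) + 1)) none = data.drop (i + 1) := by
  have h : ((i : Int) + 1) = ((i + 1 : Nat) : Int) := by push_cast; ring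
  rw [h, PySem.List.slice_from_natCast]

lemma loop_none {data : List String} (h : PySem.List.index? data "" = none) (total : Int) :
    part1AltLoop total data = total + altCount data := by
  rw [part1AltLoop]
  split
  · rename_i i' heq; rw [h] at heq; cases heq
  · rfl

lemma loop_some {data : List String} {i : Nat} (h : PySem.List.index? data "" = some i)
    (total : Int) :
    part1AltLoop total data
      = part1AltLoop (total + altCount (data.take i)) (data.drop (i + 1)) := by
  rw [part1AltLoop]
  split
  · rename_i i' heq
    rw [h] at heq
    injection heq with hi
    subst hi
    rw [slice_take, slice_drop]
  · rename_i heq; rw [h] at heq; cases heq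

lemma loop_shift (data : List String) :
    ∀ (total : Int), part1AltLoop total data = total + part1AltLoop 0 data := by
  induction hn : data.length using Nat.strong_induction_on generalizing data with
  | _ n ihn =>
    intro total
    cases hidx : PySem.List.index? data "" with
    | none => rw [loop_none hidx, loop_none hidx]; ring
    | some i =>
      obtain ⟨hk, -, -⟩ := PySem.List.getElem_of_index?_eq_some hidx
      have hlt : (data.drop (i + 1)).length < n := by simp; omega
      rw [loop_some hidx, loop_some hidx,
        ihn _ hlt (data.drop (i + 1)) rfl (total + altCount (data.take i)),
        ihn _ hlt (data.drop (i + 1)) rfl (0 + altCount (data.take i))]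
      ring

lemma alt_eq_altWith (data : List String) : part1_alt data = altWith PySem.Set.empty data := by
  rw [part1_alt]
  cases hidx : PySem.List.index? data "" with
  | none =>
    rw [loop_none hidx]
    simp only [altWith, hidx, altCount_eq]
    ring
  | some i =>
    rw [loop_some hidx, loop_shift]
    simp only [altWith, hidx, altCount_eq, part1_alt]
    ring

lemma runA_eq_altWith (data : List String) :
    ∀ s : PySem.Set Char, runA s data = altWith s data := by
  induction data with
  | nil =>
    intro s
    simp [runA, altWith, PySem.List.index?_eq_idxOf?, PySem.Set.update_nil]
  | cons l rest ih =>
    intro s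
    by_cases hl : l = ""
    · subst hl
      have h0 : PySem.List.index? ("" :: rest) "" = some 0 :=
        PySem.List.index?_cons_self "" rest
      have hL : runA s ("" :: rest) = PySem.Set.len s + runA PySem.Set.empty rest := by
        simp [runA]
      rw [hL, ih PySem.Set.empty, ← alt_eq_altWith]
      simp only [altWith, h0, List.take_zero, List.map_nil, List.flatten_nil,
        PySem.Set.update_nil, Nat.zero_add, List.drop_succ_cons, List.drop_zero]
    · have hcons : PySem.List.index? (l :: rest) ""
          = Option.map (fun x => x + 1) (PySem.List.index? rest "") :=
        PySem.List.index?_cons_of_ne rest hl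
      have hrunA : runA s (l :: rest) = runA (PySem.Set.update s l.toList) rest := by
        simp [runA, hl]
      rw [hrunA, ih (PySem.Set.update s l.toList)]
      cases hr : PySem.List.index? rest "" with
      | none =>
        simp only [altWith, hr, hcons, Option.map_none, List.map_cons, List.flatten_cons,
          PySem.Set.update_append]
      | some j =>
        simp only [altWith, hr, hcons, Option.map_some, List.take_succ_cons, List.map_cons,
          List.flatten_cons, PySem.Set.update_append, List.drop_succ_cons]

-- ===== VERDICT (by name: the statement is the Claim_ definition above) =====
theorem part1_spec : Claim_equal_part1 := by
  intro data _
  show part1 data = part1_alt data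
  have h1 : part1 data = runA PySem.Set.empty data := by
    have := foldA_eq_runA data [] PySem.Set.empty
    simpa [part1] using this
  rw [h1, runA_eq_altWith data PySem.Set.empty, ← alt_eq_altWith]
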